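-- pv_equiv track=rewrite | github.com/anshika997/DSA-with-Python | day 6/leetcode06.py | sub_productAndSum
-- ===== SOURCE A (Python) =====
-- def sub_productAndSum(n:int)->int:
--     temp = n
--     product=1
--     addition=0
--     while temp>0:
--         r=temp%10
--         temp//=10
--         addition+=r
--         product*=r
--     return product - addition
-- ===== SOURCE B (Python) =====
-- def sub_productAndSum(n: int) -> int:
--     # recursive decomposition: one recursion returning the (product, sum) pair
--     def go(t):
--         if t <= 0:
--             return (1, 0)
--         p, s = go(t // 10)
--         r = t % 10
--         return (p * r, s + r)
--     p, s = go(n)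
--     return p - s
-- ===== Notes on version B (the rewrite author's own statement) =====
-- stated objective: alternative
-- what changed: Replaces the fused while-loop with two mutable accumulators by a structural recursion over the decimal digits that returns the (product, sum) pair and subtracts once at the end.
import Mathlib
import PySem

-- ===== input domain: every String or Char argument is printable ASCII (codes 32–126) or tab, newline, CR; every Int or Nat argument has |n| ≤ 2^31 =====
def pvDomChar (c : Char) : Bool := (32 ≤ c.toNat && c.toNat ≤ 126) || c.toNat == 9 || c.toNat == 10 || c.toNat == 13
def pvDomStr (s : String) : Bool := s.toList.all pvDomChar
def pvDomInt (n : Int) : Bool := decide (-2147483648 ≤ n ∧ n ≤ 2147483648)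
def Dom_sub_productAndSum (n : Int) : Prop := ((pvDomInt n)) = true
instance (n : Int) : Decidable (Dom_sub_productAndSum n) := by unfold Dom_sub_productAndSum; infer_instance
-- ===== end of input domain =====

-- ===== PORT A =====
-- while temp>0: r=temp%10; temp//=10; addition+=r; product*=r
def aLoop (temp product addition : Int) : Int × Int :=
  if h : temp > 0 then
    let r := PySem.Int.mod temp 10
    aLoop (PySem.Int.floordiv temp 10) (product * r) (addition + r)
  else (product, addition)
termination_by temp.toNat
decreasing_by
  have h10 : (0:Int) < 10 := by norm_num
  rw [PySem.Int.floordiv_eq_ediv_of_pos h10]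
  omega

def sub_productAndSum (n : Int) : Int :=
  let pa := aLoop n 1 0
  pa.1 - pa.2

-- ===== PORT B =====
-- go(t): if t <= 0: (1,0) else (go(t//10).p * (t%10), go(t//10).s + (t%10))
def bGo (t : Int) : Int × Int :=
  if h : t ≤ 0 then (1, 0)
  else
    let ps := bGo (PySem.Int.floordiv t 10)
    let r := PySem.Int.mod t 10
    (ps.1 * r, ps.2 + r)
termination_by t.toNat
decreasing_by
  have h10 : (0:Int) < 10 := by norm_num
  rw [PySem.Int.floordiv_eq_ediv_of_pos h10]
  omega

def sub_productAndSum_alt (n : Int) : Int :=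
  let ps := bGo n
  ps.1 - ps.2

-- ===== PRECONDITION & SPEC =====
def Spec_sub_productAndSum (n : Int) (out : Int) : Prop := out = sub_productAndSum_alt n
instance (n : Int) (out : Int) : Decidable (Spec_sub_productAndSum n out) := by unfold Spec_sub_productAndSum; infer_instance

-- ===== CLAIM (what is proved, stated in full; the proofs are below) =====
def Claim_equal_sub_productAndSum : Prop := ∀ (n : Int), Dom_sub_productAndSum n → Spec_sub_productAndSum n (sub_productAndSum n)

-- ===== LEMMAS AND PROOFS =====

-- ===== VERDICT (by name: the statement is the Claim_ definition above) =====
lemma loop_eq_go (t p a : Int) : aLoop t p a = (p * (bGo t).1, a + (bGo t).2) := by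
  fun_induction aLoop t p a with
  | case1 t p a h r ih =>
      rw [ih]
      conv_rhs => rw [bGo]
      rw [dif_neg (by omega : ¬ t ≤ 0)]
      simp only [Prod.mk.injEq]
      constructor <;> ring
  | case2 t p a h =>
      rw [bGo, dif_pos (by omega : t ≤ 0)]
      simp

theorem sub_productAndSum_spec : Claim_equal_sub_productAndSum := by
  intro n _
  unfold Spec_sub_productAndSum sub_productAndSum sub_productAndSum_alt
  rw [loop_eq_go]
  ring
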